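-- pv_equiv track=rewrite | github.com/RndmMeme/Lufia-2-Autotracker | canvas_config2.py | check_access
-- ===== SOURCE A (Python) =====
-- def check_access(location, inventory, scenario_items, location_logic):
--     rules = location_logic.get(location, {}).get('access_rules', [])
--     if not rules:
--         return 'accessible'
--     for rule in rules:
--         items = rule.split(',')
--         if all(item in inventory or item in scenario_items for item in items):
--             return 'accessible'
--     return 'partly_accessible' if any(item in inventory or item in scenario_items for rule in rules for item in rule.split(',')) else 'not_accessible'
-- ===== SOURCE B (Python) =====
-- def check_access(location, inventory, scenario_items, location_logic):
--     rules = location_logic.get(location, {}).get('access_rules', [])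
--     if not rules:
--         return 'accessible'
--     available = set(inventory) | set(scenario_items)
--
--     def score(rule):
--         items = rule.split(',')
--         hits = sum(item in available for item in items)
--         return 2 if hits == len(items) else 1 if hits else 0
--
--     best = max(score(rule) for rule in rules)
--     if best == 2:
--         return 'accessible'
--     if best == 1:
--         return 'partly_accessible'
--     return 'not_accessible'
-- ===== Notes on version B (the rewrite author's own statement) =====
-- stated objective: alternative
-- what changed: Instead of A's early-return full-match scan followed by a second any-item rescan with list membership tests, B grades every rule with a numeric score (2 = all items available, 1 = some, 0 = none) by counting hits against a precomputed availability set, takes the maximum score over all rules, and maps that maximum to the answer.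
import Mathlib
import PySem

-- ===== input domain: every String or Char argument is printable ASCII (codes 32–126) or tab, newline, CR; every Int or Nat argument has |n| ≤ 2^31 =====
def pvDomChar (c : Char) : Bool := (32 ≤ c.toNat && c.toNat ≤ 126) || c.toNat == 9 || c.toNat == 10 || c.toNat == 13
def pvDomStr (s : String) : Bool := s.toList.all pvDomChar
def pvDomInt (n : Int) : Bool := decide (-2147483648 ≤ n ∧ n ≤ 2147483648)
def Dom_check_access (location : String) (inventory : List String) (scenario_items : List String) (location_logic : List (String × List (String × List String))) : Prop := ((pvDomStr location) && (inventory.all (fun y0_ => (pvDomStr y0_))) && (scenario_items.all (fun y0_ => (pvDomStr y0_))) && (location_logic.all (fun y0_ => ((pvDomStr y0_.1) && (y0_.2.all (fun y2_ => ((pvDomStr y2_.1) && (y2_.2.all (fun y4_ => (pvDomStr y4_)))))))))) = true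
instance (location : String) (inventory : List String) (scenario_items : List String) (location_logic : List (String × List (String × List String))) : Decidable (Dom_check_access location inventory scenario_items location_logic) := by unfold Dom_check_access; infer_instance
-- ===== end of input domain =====

-- B replaces A's early-return full-match scan plus second any-item rescan by grading each rule with a hit-count score (2/1/0) against a precomputed availability set and mapping the maximum score to the answer (alternative decomposition; return value unchanged).


-- ===== PORT A =====
-- A scans the rules for a full match with an early return, then re-splits every rule in a final any-comprehension.
def check_access_loopA (avail : String → Bool) (rules : List String) : Option String :=
  match rules with
  | [] => none
  | rule :: rest =>
      let items := (PySem.Str.split? rule ",").getD []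
      if items.all (fun item => avail item) then some "accessible"
      else check_access_loopA avail rest

def check_access (location : String) (inventory : List String) (scenario_items : List String) (location_logic : List (String × List (String × List String))) : String :=
  let rules := PySem.Dict.getD (PySem.Dict.mk (PySem.Dict.getD (PySem.Dict.mk location_logic) location [])) "access_rules" []
  if rules = [] then "accessible"
  else
    let avail : String → Bool := fun item => inventory.contains item || scenario_items.contains item
    match check_access_loopA avail rules with
    | some s => s
    | none =>
        if rules.any (fun rule => ((PySem.Str.split? rule ",").getD []).any (fun item => avail item)) then
          "partly_accessible"
        else "not_accessible"

-- ===== PORT B =====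
-- B grades each rule: hits = number of its items in the availability set; score 2 if all, 1 if some, 0 if none.
def check_access_score (available : PySem.Set String) (rule : String) : Int :=
  let items := (PySem.Str.split? rule ",").getD []
  let hits : Int := (items.map (fun item => if PySem.Set.contains available item then (1 : Int) else 0)).sum
  if hits = (items.length : Int) then 2 else if hits ≠ 0 then 1 else 0

def check_access_alt (location : String) (inventory : List String) (scenario_items : List String) (location_logic : List (String × List (String × List String))) : String :=
  let rules := PySem.Dict.getD (PySem.Dict.mk (PySem.Dict.getD (PySem.Dict.mk location_logic) location [])) "access_rules" []
  if rules = [] then "accessible"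
  else
    let available : PySem.Set String := PySem.Set.union (PySem.Set.ofList inventory) (PySem.Set.ofList scenario_items)
    let best : Int :=
      match PySem.List.max? (rules.map (check_access_score available)) (fun y => y) with
      | some m => m
      | none => 0   -- unreachable: rules ≠ []
    if best = 2 then "accessible"
    else if best = 1 then "partly_accessible"
    else "not_accessible"

-- ===== PRECONDITION & SPEC =====
def Spec_check_access (location : String) (inventory : List String) (scenario_items : List String) (location_logic : List (String × List (String × List String))) (out : String) : Prop := out = check_access_alt location inventory scenario_items location_logic
instance (location : String) (inventory : List String) (scenario_items : List String) (location_logic : List (String × List (String × List String))) (out : String) : Decidable (Spec_check_access location inventory scenario_items location_logic out) := by unfold Spec_check_access; infer_instance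

-- ===== CLAIM =====
def Claim_equal_check_access : Prop := ∀ (location : String) (inventory : List String) (scenario_items : List String) (location_logic : List (String × List (String × List String))), Dom_check_access location inventory scenario_items location_logic → Spec_check_access location inventory scenario_items location_logic (check_access location inventory scenario_items location_logic)

-- ===== LEMMAS AND PROOFS =====

-- the availability set tests exactly what A's inline membership tests
theorem contains_union_ofList (inv sc : List String) (x : String) :
    PySem.Set.contains (PySem.Set.union (PySem.Set.ofList inv) (PySem.Set.ofList sc)) x
      = (inv.contains x || sc.contains x) := by
  simp [PySem.Set.contains_eq_listContains, PySem.Set.mem_union, PySem.Set.mem_ofList]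

-- score of a rule via A's membership predicate
theorem score_eq (avail : String → Bool) (s : PySem.Set String)
    (hs : ∀ x, PySem.Set.contains s x = avail x) (rule : String) :
    check_access_score s rule =
      (let items := (PySem.Str.split? rule ",").getD []
       if items.all avail then 2 else if items.any avail then 1 else 0) := by
  unfold check_access_score
  simp only [hs]
  have hsum : ((((PySem.Str.split? rule ",").getD []).map
      (fun item => if avail item then (1 : Int) else 0)).sum)
      = ((((PySem.Str.split? rule ",").getD []).countP avail : Nat) : Int) :=
    PySem.List.sum_map_ite_one_zero _ _
  rw [hsum]
  set items := (PySem.Str.split? rule ",").getD [] with hit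
  by_cases hall : items.all avail
  · have : items.countP avail = items.length := by
      rw [List.countP_eq_length]
      intro a ha; exact List.all_eq_true.mp hall a ha
    simp [this, hall]
  · have hlt : items.countP avail < items.length :=
      lt_of_le_of_ne List.countP_le_length (by
        intro he
        exact hall (List.all_eq_true.mpr (List.countP_eq_length.mp he)))
    have hc1 : ¬ ((items.countP avail : Int) = (items.length : Int)) := by
      exact_mod_cast Nat.ne_of_lt hlt
    by_cases hany : items.any avail
    · simp [hc1, hall, hany]
      exact List.any_eq_true.mp hany
    · have h0 : items.countP avail = 0 := by
        rw [List.countP_eq_zero]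
        intro a ha hpa
        exact hany (List.any_eq_true.mpr ⟨a, ha, hpa⟩)
      have hlen : 0 < items.length := h0 ▸ hlt
      have hc1' : ¬ ((0 : Int) = (items.length : Int)) := by
        exact_mod_cast (Nat.ne_of_lt hlen)
      simp [h0, hc1', hall, hany]

-- A's first loop finds a full match iff one exists
theorem loopA_eq (avail : String → Bool) (rules : List String) :
    check_access_loopA avail rules =
      (if rules.any (fun r => ((PySem.Str.split? r ",").getD []).all avail) then some "accessible" else none) := by
  induction rules with
  | nil => simp [check_access_loopA]
  | cons r rest ih =>
      simp only [check_access_loopA, List.any_cons, ih]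
      by_cases h : ((PySem.Str.split? r ",").getD []).all avail <;> simp [h]

-- score bounds
theorem score_mem_bounds (avail : String → Bool) (s : PySem.Set String)
    (hs : ∀ x, PySem.Set.contains s x = avail x) (rule : String) :
    check_access_score s rule = 0 ∨ check_access_score s rule = 1 ∨ check_access_score s rule = 2 := by
  rw [score_eq avail s hs]
  by_cases h1 : ((PySem.Str.split? rule ",").getD []).all avail <;>
    by_cases h2 : ((PySem.Str.split? rule ",").getD []).any avail <;> simp [h1, h2]

-- the core equality, on the common availability predicate
theorem core_eq (avail : String → Bool) (s : PySem.Set String)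
    (hs : ∀ x, PySem.Set.contains s x = avail x) (r : String) (rest : List String) :
    (match check_access_loopA avail (r :: rest) with
     | some t => t
     | none =>
         if (r :: rest).any (fun rule => ((PySem.Str.split? rule ",").getD []).any avail) then
           "partly_accessible"
         else "not_accessible") =
    (let best : Int :=
      match PySem.List.max? ((r :: rest).map (check_access_score s)) (fun y => y) with
      | some m => m
      | none => 0
     if best = 2 then "accessible" else if best = 1 then "partly_accessible" else "not_accessible") := by
  rw [loopA_eq]
  simp only [List.map_cons, PySem.List.max?_id_cons]
  set best := (rest.map (check_access_score s)).foldl max (check_access_score s r) with hbest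
  have hub : ∀ (b : Int), (check_access_score s r ≤ b) → (∀ x ∈ rest, check_access_score s x ≤ b) → best ≤ b := by
    intro b h1 h2
    rcases PySem.List.foldl_max_mem (rest.map (check_access_score s)) (check_access_score s r) with h | h
    · rw [hbest, h]; exact h1
    · obtain ⟨x, hx, hxe⟩ := List.mem_map.mp h
      rw [hbest, ← hxe]; exact h2 x hx
  have hlb1 : check_access_score s r ≤ best :=
    (PySem.List.le_foldl_max (rest.map (check_access_score s)) (check_access_score s r)).1
  have hlb2 : ∀ x ∈ rest, check_access_score s x ≤ best := by
    intro x hx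
    exact (PySem.List.le_foldl_max (rest.map (check_access_score s)) (check_access_score s r)).2
      _ (List.mem_map.mpr ⟨x, hx, rfl⟩)
  have hscore2 : ∀ x, check_access_score s x = 2 ↔ ((PySem.Str.split? x ",").getD []).all avail := by
    intro x
    rw [score_eq avail s hs]
    by_cases h1 : ((PySem.Str.split? x ",").getD []).all avail <;>
      by_cases h2 : ((PySem.Str.split? x ",").getD []).any avail <;> simp [h1, h2]
  by_cases hfull : (r :: rest).any (fun x => ((PySem.Str.split? x ",").getD []).all avail)
  · -- some rule fully matches: best = 2
    have h2 : best = 2 := by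
      obtain ⟨x, hx, hpx⟩ := List.any_eq_true.mp hfull
      have hxs : check_access_score s x = 2 := (hscore2 x).mpr hpx
      have hle : best ≤ 2 := by
        apply hub <;> try intro y hy
        · rcases score_mem_bounds avail s hs r with h | h | h <;> omega
        · rcases score_mem_bounds avail s hs y with h | h | h <;> omega
      have hge : (2 : Int) ≤ best := by
        rcases List.mem_cons.mp hx with h | h
        · have h2 : check_access_score s r = 2 := h ▸ hxs
          omega
        · rw [← hxs]; exact hlb2 x h
      omega
    simp [hfull, h2]
  · -- no full match: best ≤ 1
    have hnot2 : ∀ x ∈ (r :: rest), check_access_score s x ≠ 2 := by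
      intro x hx h
      exact hfull (List.any_eq_true.mpr ⟨x, hx, (hscore2 x).mp h⟩)
    have hle1 : best ≤ 1 := by
      apply hub
      · rcases score_mem_bounds avail s hs r with h | h | h
        · omega
        · omega
        · exact absurd h (hnot2 r (List.mem_cons_self))
      · intro y hy
        rcases score_mem_bounds avail s hs y with h | h | h
        · omega
        · omega
        · exact absurd h (hnot2 y (List.mem_cons_of_mem _ hy))
    have hscore1 : ∀ x ∈ (r :: rest),
        (check_access_score s x = 1 ↔ ((PySem.Str.split? x ",").getD []).any avail) := by
      intro x hx
      have hnf : ¬ ((PySem.Str.split? x ",").getD []).all avail := by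
        intro h
        exact hfull (List.any_eq_true.mpr ⟨x, hx, h⟩)
      rw [score_eq avail s hs]
      by_cases h2 : ((PySem.Str.split? x ",").getD []).any avail <;> simp [hnf, h2]
    by_cases hpart : (r :: rest).any (fun rule => ((PySem.Str.split? rule ",").getD []).any avail)
    · -- partial: best = 1
      have h1 : best = 1 := by
        obtain ⟨x, hx, hpx⟩ := List.any_eq_true.mp hpart
        have hxs : check_access_score s x = 1 := (hscore1 x hx).mpr hpx
        have hge : (1 : Int) ≤ best := by
          rcases List.mem_cons.mp hx with h | h
          · have h1 : check_access_score s r = 1 := h ▸ hxs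
            omega
          · rw [← hxs]; exact hlb2 x h
        omega
      simp [hfull, hpart, h1]
    · -- none: best = 0
      have h0 : best = 0 := by
        have hall0 : ∀ x ∈ (r :: rest), check_access_score s x = 0 := by
          intro x hx
          rcases score_mem_bounds avail s hs x with h | h | h
          · exact h
          · exact absurd ((hscore1 x hx).mp h)
              (fun hp => hpart (List.any_eq_true.mpr ⟨x, hx, hp⟩))
          · exact absurd h (hnot2 x hx)
        have hle : best ≤ 0 := by
          apply hub
          · exact le_of_eq (hall0 r (List.mem_cons_self))
          · intro y hy; exact le_of_eq (hall0 y (List.mem_cons_of_mem _ hy))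
        have hge : (0 : Int) ≤ best := by
          rw [← hall0 r (List.mem_cons_self)]; exact hlb1
        omega
      simp [hfull, hpart, h0]

-- ===== VERDICT =====
theorem check_access_spec : Claim_equal_check_access := by
  intro location inventory scenario_items location_logic _
  unfold Spec_check_access check_access check_access_alt
  set rules := PySem.Dict.getD (PySem.Dict.mk (PySem.Dict.getD (PySem.Dict.mk location_logic) location [])) "access_rules" [] with hr
  by_cases h : rules = []
  · simp [h]
  · simp only [h, if_false]
    obtain ⟨r, rest, hrr⟩ := List.exists_cons_of_ne_nil h
    rw [hrr]
    exact core_eq _ _ (contains_union_ofList inventory scenario_items) r rest
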